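-- pv_equiv track=rewrite | github.com/sean-galloway/RTLDesignSherpa | bin/vcd2wavedrom2.py | group_and_sort_signals
-- ===== SOURCE A (Python) =====
-- def group_and_sort_signals(signals, hierarchy_list):
--     # List to hold signals with their hierarchy depth
--     signals_with_depth = []
--
--     for signal in signals:
--         if len(hierarchy_list) == 0:
--             # If no hierarchies are provided, use hierarchy depth 0 for all signals
--             signals_with_depth.append((0, signal))
--         else:
--             for hierarchy in hierarchy_list:
--                 if hierarchy in signal:
--                     # Determine hierarchy depth by counting the number of periods in the signal
--                     hierarchy_depth = signal.count('.')
--                     signals_with_depth.append((hierarchy_depth, signal))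
--                     break  # Break if the signal matches one of the hierarchies
--
--     # Sort the signals first by hierarchy depth, then alphabetically
--     signals_with_depth.sort(key=lambda x: (x[0], x[1]))
--
--     # Extract sorted signals
--     return [signal for depth, signal in signals_with_depth]
-- ===== SOURCE B (Python) =====
-- def group_and_sort_signals(signals, hierarchy_list):
--     if not hierarchy_list:
--         return sorted(signals)
--     matched = [s for s in signals if any(h in s for h in hierarchy_list)]
--     depths = sorted({s.count('.') for s in matched})
--     result = []
--     for d in depths:
--         result += sorted(s for s in matched if s.count('.') == d)
--     return result
-- ===== Notes on version B (the rewrite author's own statement) =====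
-- stated objective: alternative
-- what changed: B replaces A's build-(depth,name)-tuples-then-one-global-tuple-sort with a group-by-depth decomposition: filter the matching signals once, enumerate the distinct dot-depths in increasing order, and emit each depth's bucket sorted by name.
import Mathlib
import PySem

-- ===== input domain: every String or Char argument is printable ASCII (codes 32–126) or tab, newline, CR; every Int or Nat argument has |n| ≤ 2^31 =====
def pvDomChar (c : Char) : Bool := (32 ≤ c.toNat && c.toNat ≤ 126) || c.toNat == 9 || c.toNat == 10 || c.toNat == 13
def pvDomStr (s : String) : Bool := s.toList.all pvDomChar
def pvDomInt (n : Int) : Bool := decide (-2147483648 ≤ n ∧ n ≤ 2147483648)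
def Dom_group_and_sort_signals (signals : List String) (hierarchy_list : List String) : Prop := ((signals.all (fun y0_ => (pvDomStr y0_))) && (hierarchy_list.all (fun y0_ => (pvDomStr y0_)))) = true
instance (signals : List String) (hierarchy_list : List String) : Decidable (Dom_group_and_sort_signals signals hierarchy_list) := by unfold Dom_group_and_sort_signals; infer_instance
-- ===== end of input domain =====

-- B groups matching signals by dot-depth and emits each bucket name-sorted, instead of A's single global (depth, name) tuple sort; return values proved equal on all inputs (alternative decomposition, no speed claim).

-- ===== PORT A =====
-- inner loop 'for hierarchy in hierarchy_list: if hierarchy in signal: …; break'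
def gassInnerLoop (signal : String) (acc : List (Int × String)) : List String → List (Int × String)
  | [] => acc
  | h :: t =>
    if PySem.Str.isIn h signal then
      acc ++ [(((PySem.Str.count signal "." : Nat) : Int), signal)]
    else gassInnerLoop signal acc t

def group_and_sort_signals (signals : List String) (hierarchy_list : List String) : List String :=
  let signals_with_depth : List (Int × String) :=
    signals.foldl (fun acc signal =>
      if hierarchy_list.length = 0 then acc ++ [((0 : Int), signal)]
      else gassInnerLoop signal acc hierarchy_list) []
  let sorted_swd := PySem.List.sorted2 signals_with_depth (fun x => x.1) (fun x => x.2) false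
  sorted_swd.map (fun p => p.2)

-- ===== PORT B =====
def gassDepth (s : String) : Int := ((PySem.Str.count s "." : Nat) : Int)

def group_and_sort_signals_alt (signals : List String) (hierarchy_list : List String) : List String :=
  if hierarchy_list = [] then
    PySem.List.sorted signals (fun x => x) false
  else
    let matched := signals.filter (fun s => hierarchy_list.any (fun h => PySem.Str.isIn h s))
    let depths := PySem.List.sorted (PySem.Set.ofList (matched.map gassDepth)) (fun x => x) false
    depths.foldl (fun acc d =>
      acc ++ PySem.List.sorted (matched.filter (fun s => gassDepth s == d)) (fun x => x) false) []

-- ===== PRECONDITION & SPEC =====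
def Spec_group_and_sort_signals (signals : List String) (hierarchy_list : List String) (out : List String) : Prop := out = group_and_sort_signals_alt signals hierarchy_list
instance (signals : List String) (hierarchy_list : List String) (out : List String) : Decidable (Spec_group_and_sort_signals signals hierarchy_list out) := by unfold Spec_group_and_sort_signals; infer_instance

-- ===== CLAIM (what is proved, stated in full; the proofs are below) =====
def Claim_equal_group_and_sort_signals : Prop := ∀ (signals : List String) (hierarchy_list : List String), Dom_group_and_sort_signals signals hierarchy_list → Spec_group_and_sort_signals signals hierarchy_list (group_and_sort_signals signals hierarchy_list)

-- ===== LEMMAS AND PROOFS =====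

-- the combined sort key of A: lexicographic (depth, name)
def gassKey (s : String) : Lex (Int × String) := toLex (gassDepth s, s)

theorem gassKey_injective : Function.Injective gassKey := by
  intro a b h
  have := (toLex.injective h)
  exact congrArg Prod.snd this

-- the inner loop appends one (depth, signal) pair iff some hierarchy occurs in the signal
theorem gassInnerLoop_eq (signal : String) (acc : List (Int × String)) (hl : List String) :
    gassInnerLoop signal acc hl =
      if hl.any (fun h => PySem.Str.isIn h signal) then acc ++ [(gassDepth signal, signal)] else acc := by
  induction hl with
  | nil => simp [gassInnerLoop]
  | cons h t ih =>
    cases hc : PySem.Str.isIn h signal with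
    | true => simp only [gassInnerLoop, hc, if_true, List.any_cons, Bool.true_or, gassDepth]
    | false => simp only [gassInnerLoop, hc, Bool.false_eq_true, if_false, ih, List.any_cons, Bool.false_or]

-- comparator congruence: sorting is determined by the strict order of the keys
theorem sorted_key_congr {α κ κ' : Type} [LT κ] [DecidableLT κ] [LT κ'] [DecidableLT κ']
    (xs : List α) (k : α → κ) (k' : α → κ')
    (h : ∀ a b, k a < k b ↔ k' a < k' b) :
    PySem.List.sorted xs k false = PySem.List.sorted xs k' false := by
  rw [PySem.List.sorted_eq_foldl_insertBy, PySem.List.sorted_eq_foldl_insertBy]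
  have hb : (fun a b => decide (k a < k b)) = (fun a b => decide (k' a < k' b)) := by
    funext a b; exact decide_eq_decide.mpr (h a b)
  rw [hb]

-- A's tuple sort is the plain sort by the lexicographic pair key
theorem sorted2_eq_sorted_lex (xs : List (Int × String)) :
    PySem.List.sorted2 xs (fun x => x.1) (fun x => x.2) false =
      PySem.List.sorted xs (fun p => (toLex p : Lex (Int × String))) false := by
  rw [PySem.List.sorted_eq_foldl_insertBy]
  simp only [PySem.List.sorted2, if_neg (by decide : ¬ (false = true))]
  have hb : (fun (a b : Int × String) => decide (a.1 < b.1) || (!decide (b.1 < a.1) && decide (a.2 < b.2)))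
      = (fun (a b : Int × String) => decide ((toLex a : Lex (Int × String)) < toLex b)) := by
    funext a b
    by_cases h1 : a.1 < b.1
    · simp [h1, Prod.Lex.toLex_lt_toLex]
    · by_cases h2 : b.1 < a.1
      · have hne : ¬ (a.1 = b.1) := fun h => absurd (h ▸ h2) (lt_irrefl _)
        simp [h1, h2, Prod.Lex.toLex_lt_toLex, hne]
      · have he : a.1 = b.1 := le_antisymm (not_lt.mp h2) (not_lt.mp h1)
        by_cases h3 : a.2 < b.2
        · simp [h1, h2, h3, Prod.Lex.toLex_lt_toLex, he]
        · simp [h1, h2, h3, Prod.Lex.toLex_lt_toLex, he]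
  rw [hb]

-- sorting a mapped list = mapping the sort by the composed key
theorem insertBy_map {α β : Type} (f : α → β) (before : β → β → Bool) (x : α) (ys : List α) :
    PySem.List.insertBy before (f x) (ys.map f) =
      (PySem.List.insertBy (fun a b => before (f a) (f b)) x ys).map f := by
  induction ys with
  | nil => simp [PySem.List.insertBy]
  | cons y t ih =>
    by_cases h : before (f x) (f y)
    · simp [PySem.List.insertBy, h]
    · simp [PySem.List.insertBy, h, ih]

theorem sorted_map_key {α β κ : Type} [LT κ] [DecidableLT κ]
    (f : α → β) (key : β → κ) (xs : List α) :
    PySem.List.sorted (xs.map f) key false =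
      (PySem.List.sorted xs (fun x => key (f x)) false).map f := by
  rw [PySem.List.sorted_eq_foldl_insertBy, PySem.List.sorted_eq_foldl_insertBy, List.foldl_map]
  have main : ∀ (xs : List α) (ys : List α),
      xs.foldl (fun acc x => PySem.List.insertBy (fun a b => decide (key a < key b)) (f x) acc) (ys.map f)
        = (xs.foldl (fun acc x => PySem.List.insertBy (fun a b => decide (key (f a) < key (f b))) x acc) ys).map f := by
    intro xs
    induction xs with
    | nil => intro ys; simp
    | cons x t ih =>
      intro ys
      simp only [List.foldl_cons, insertBy_map f (fun a b => decide (key a < key b)) x ys]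
      exact ih _
  simpa using main xs []

-- A equals the plain sort of the matched signals by gassKey (non-empty hierarchy case)
theorem A_eq_sorted_matched (signals hl : List String) (hne : hl ≠ []) :
    group_and_sort_signals signals hl =
      PySem.List.sorted (signals.filter (fun s => hl.any (fun h => PySem.Str.isIn h s))) gassKey false := by
  unfold group_and_sort_signals
  have hlen : ¬ (hl.length = 0) := by simpa [List.length_eq_zero_iff] using hne
  simp only [hlen, if_false, gassInnerLoop_eq]
  rw [PySem.List.foldl_append_if (fun s => hl.any (fun h => PySem.Str.isIn h s)) (fun s => (gassDepth s, s))]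
  rw [List.nil_append, sorted2_eq_sorted_lex, sorted_map_key]
  simp only [List.map_map]
  have hk : (fun s => (toLex ((fun s => (gassDepth s, s)) s) : Lex (Int × String))) = gassKey := rfl
  rw [hk]
  have hid : ((fun p : Int × String => p.2) ∘ fun s => (gassDepth s, s)) = id := rfl
  rw [hid, List.map_id]

-- distinct-depth decomposition: concatenating the buckets is a permutation of the list
theorem flatMap_filter_perm (D : List Int) :
    ∀ (xs : List String), D.Nodup → (∀ x ∈ xs, gassDepth x ∈ D) →
      (D.flatMap (fun d => xs.filter (fun s => gassDepth s == d))).Perm xs := by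
  induction D with
  | nil =>
    intro xs _ hcov
    have hx : xs = [] := by
      cases xs with
      | nil => rfl
      | cons a t => exact absurd (hcov a (by simp)) (by simp)
    simp [hx]
  | cons d t ih =>
    intro xs hnd hcov
    simp only [List.flatMap_cons]
    have hrw : t.flatMap (fun d' => xs.filter (fun s => gassDepth s == d'))
        = t.flatMap (fun d' => (xs.filter (fun s => !(gassDepth s == d))).filter (fun s => gassDepth s == d')) := by
      apply List.flatMap_congr
      intro d' hd'
      rw [List.filter_filter]
      apply List.filter_congr
      intro s _
      cases hq : (gassDepth s == d') with
      | false => simp [hq]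
      | true =>
        have h : gassDepth s = d' := by simpa using hq
        have hdd : (gassDepth s == d) = false := by
          simp only [beq_eq_false_iff_ne, ne_eq]
          intro hh
          have hde : d = d' := by rw [← hh, h]
          exact (List.nodup_cons.mp hnd).1 (hde ▸ hd')
        simp [hq, hdd]
    rw [hrw]
    have ihp := ih (xs.filter (fun s => !(gassDepth s == d))) (List.nodup_cons.mp hnd).2 ?_
    · exact (ihp.append_left _).trans (List.filter_append_perm _ xs)
    · intro x hx
      have hx' := List.mem_filter.mp hx
      have hcd := hcov x hx'.1
      simp only [List.mem_cons] at hcd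
      rcases hcd with h | h
      · exfalso
        have h2 := hx'.2
        simp only [h, beq_self_eq_true, Bool.not_true, Bool.false_eq_true] at h2
      · exact h

theorem flatMap_sorted_perm (D : List Int) (xs : List String) :
    (D.flatMap (fun d => PySem.List.sorted (xs.filter (fun s => gassDepth s == d)) (fun x => x) false)).Perm
      (D.flatMap (fun d => xs.filter (fun s => gassDepth s == d))) := by
  induction D with
  | nil => simp
  | cons d t ih =>
    simp only [List.flatMap_cons]
    exact (PySem.List.sorted_perm _ _ _).append ih

theorem flatMap_sorted_pairwise (D : List Int) (xs : List String) (hD : D.Pairwise (· < ·)) :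
    (D.flatMap (fun d => PySem.List.sorted (xs.filter (fun s => gassDepth s == d)) (fun x => x) false)).Pairwise
      (fun a b => gassKey a ≤ gassKey b) := by
  induction D with
  | nil => simp
  | cons d t ih =>
    have hD' := List.pairwise_cons.mp hD
    simp only [List.flatMap_cons]
    rw [List.pairwise_append]
    refine ⟨?_, ih hD'.2, ?_⟩
    · have hp := PySem.List.sorted_pairwise (xs.filter (fun s => gassDepth s == d)) (fun x => x)
      refine hp.imp_of_mem ?_
      intro a b ha hb hle
      have hda : gassDepth a = d := by
        have := (List.mem_filter.mp ((PySem.List.mem_sorted _ _ _ a).mp ha)).2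
        simpa using this
      have hdb : gassDepth b = d := by
        have := (List.mem_filter.mp ((PySem.List.mem_sorted _ _ _ b).mp hb)).2
        simpa using this
      show gassKey a ≤ gassKey b
      rw [gassKey, gassKey, Prod.Lex.toLex_le_toLex]
      exact Or.inr ⟨by rw [hda, hdb], hle⟩
    · intro a ha b hb
      obtain ⟨d', hd', hbmem⟩ := List.mem_flatMap.mp hb
      have hda : gassDepth a = d := by
        have := (List.mem_filter.mp ((PySem.List.mem_sorted _ _ _ a).mp ha)).2
        simpa using this
      have hdb : gassDepth b = d' := by
        have := (List.mem_filter.mp ((PySem.List.mem_sorted _ _ _ b).mp hbmem)).2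
        simpa using this
      have hlt : d < d' := hD'.1 d' hd'
      show gassKey a ≤ gassKey b
      rw [gassKey, gassKey]
      exact le_of_lt (Prod.Lex.toLex_lt_toLex.mpr (Or.inl (by rw [hda, hdb]; exact hlt)))

-- ===== VERDICT (by name: the statement is the Claim_ definition above) =====
theorem group_and_sort_signals_spec : Claim_equal_group_and_sort_signals := by
  intro signals hl _
  unfold Spec_group_and_sort_signals
  by_cases hne : hl = []
  · subst hne
    unfold group_and_sort_signals group_and_sort_signals_alt
    simp only [List.length_nil, eq_self_iff_true, if_true]
    rw [PySem.List.foldl_append_singleton_eq_map, List.nil_append,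
      sorted2_eq_sorted_lex, sorted_map_key]
    simp only [List.map_map]
    rw [sorted_key_congr signals (fun s => (toLex (((0 : Int), s)) : Lex (Int × String))) (fun x => x)
      (by intro a b; simp [Prod.Lex.toLex_lt_toLex])]
    simp
  · rw [A_eq_sorted_matched signals hl hne]
    unfold group_and_sort_signals_alt
    rw [if_neg hne]
    simp only []
    rw [PySem.List.foldl_append_eq_flatMap, List.nil_append]
    have hnd : (PySem.List.sorted (PySem.Set.ofList ((signals.filter (fun s => hl.any (fun h => PySem.Str.isIn h s))).map gassDepth)) (fun x => x) false).Nodup :=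
      (PySem.List.sorted_perm _ _ _).symm.nodup (PySem.Set.nodup_ofList _)
    have hcov : ∀ x ∈ signals.filter (fun s => hl.any (fun h => PySem.Str.isIn h s)),
        gassDepth x ∈ PySem.List.sorted (PySem.Set.ofList ((signals.filter (fun s => hl.any (fun h => PySem.Str.isIn h s))).map gassDepth)) (fun x => x) false := by
      intro x hx
      rw [PySem.List.mem_sorted, PySem.Set.mem_ofList]
      exact List.mem_map_of_mem hx
    apply PySem.List.eq_of_perm_of_pairwise_le_of_injective gassKey gassKey_injective
    · exact (PySem.List.sorted_perm _ _ _).trans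
        (((flatMap_sorted_perm _ _).trans (flatMap_filter_perm _ _ hnd hcov)).symm)
    · exact PySem.List.sorted_pairwise _ _
    · exact flatMap_sorted_pairwise _ _ (PySem.List.sorted_ofList_pairwise_lt _)
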